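-- pv_equiv track=rewrite | github.com/rajasekhar02/reading-x-source-code | Complete Reference/Maths/7-8-2023_leetcode_bicontest_2.py | getPowOf5
-- ===== SOURCE A (Python) =====
-- def getPowOf5(num):
--     low = 0
--     high = 18
--     ans = -1
--     while low <= high:
--         mid = low + (high - low) // 2
--         if pow(5, mid) == num:
--             return mid
--         elif pow(5, mid) < num:
--             low = low + 1
--         else:
--             high = high - 1
--     return ans
-- ===== SOURCE B (Python) =====
-- def getPowOf5(num):
--     cur = 1
--     for n in range(19):
--         if cur == num:
--             return n
--         cur *= 5
--     return -1
-- ===== Notes on version B (the rewrite author's own statement) =====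
-- stated objective: simpler
-- what changed: The low/high window-narrowing loop with repeated pow(5,mid) is replaced by a single sweep n=0..18 over one running product cur=5^n, returning n on match and -1 after the loop.
import Mathlib
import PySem

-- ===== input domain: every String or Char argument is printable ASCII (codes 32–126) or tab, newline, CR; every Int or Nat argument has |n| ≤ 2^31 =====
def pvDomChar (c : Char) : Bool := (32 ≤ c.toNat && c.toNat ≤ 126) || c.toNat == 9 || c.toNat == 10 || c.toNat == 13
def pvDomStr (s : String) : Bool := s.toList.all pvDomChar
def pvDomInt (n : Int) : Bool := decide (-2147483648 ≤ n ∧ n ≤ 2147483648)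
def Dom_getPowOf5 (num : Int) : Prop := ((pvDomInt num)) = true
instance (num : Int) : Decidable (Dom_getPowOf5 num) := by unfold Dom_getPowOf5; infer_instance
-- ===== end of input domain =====

-- B replaces A's low/high window narrowing (with pow(5,mid) each step) by one sweep
-- over a running product cur = 5^n, n = 0..18; objective: simpler.

-- ===== PORT A =====
-- A's while-loop: state (low, high); each iteration moves low up or high down by 1.
def getPowOf5Loop (num low high : Int) : Int :=
  if low ≤ high then
    let mid := low + PySem.Int.floordiv (high - low) 2
    if (5 : Int) ^ mid.toNat = num then mid
    else if (5 : Int) ^ mid.toNat < num then getPowOf5Loop num (low + 1) high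
    else getPowOf5Loop num low (high - 1)
  else -1
termination_by (high + 1 - low).toNat
decreasing_by all_goals omega

def getPowOf5 (num : Int) : Int := getPowOf5Loop num 0 18

-- ===== PORT B =====
-- B's for-loop over range(19) with running product cur.
def getPowOf5AltLoop (num cur : Int) (n : Nat) : Int :=
  if n < 19 then
    if cur = num then (n : Int) else getPowOf5AltLoop num (cur * 5) (n + 1)
  else -1
termination_by 19 - n

def getPowOf5_alt (num : Int) : Int := getPowOf5AltLoop num 1 0

-- ===== PRECONDITION & SPEC =====
def Spec_getPowOf5 (num : Int) (out : Int) : Prop := out = getPowOf5_alt num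
instance (num : Int) (out : Int) : Decidable (Spec_getPowOf5 num out) := by unfold Spec_getPowOf5; infer_instance

-- ===== CLAIM (what is proved, stated in full; the proofs are below) =====
def Claim_equal_getPowOf5 : Prop := ∀ (num : Int), Dom_getPowOf5 num → Spec_getPowOf5 num (getPowOf5 num)

-- ===== LEMMAS AND PROOFS =====

lemma pow5_lt_pow5 {m n : Nat} (h : m < n) : (5 : Int) ^ m < 5 ^ n :=
  pow_lt_pow_right₀ (by norm_num) h

lemma pow5_inj {m n : Nat} (h : (5 : Int) ^ m = 5 ^ n) : m = n := by
  rcases lt_trichotomy m n with hl | he | hl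
  · exact absurd h (ne_of_lt (pow5_lt_pow5 hl))
  · exact he
  · exact absurd h.symm (ne_of_lt (pow5_lt_pow5 hl))

lemma pow5_lt_exp {m n : Nat} (h : (5 : Int) ^ m < 5 ^ n) : m < n := by
  by_contra hc
  exact absurd (pow_le_pow_right₀ (by norm_num : (1:Int) ≤ 5) (Nat.le_of_not_lt hc)) (not_le.mpr h)

-- If 5^k = num for some k in [low, high] (low ≥ 0), A's loop returns k.
lemma loopA_found (num : Int) : ∀ (N : Nat) (low high k : Int),
    (high + 1 - low).toNat ≤ N → 0 ≤ low → low ≤ k → k ≤ high →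
    (5 : Int) ^ k.toNat = num → getPowOf5Loop num low high = k := by
  intro N
  induction N with
  | zero => intro low high k hN h0 hlk hkh _; omega
  | succ N ih =>
    intro low high k hN h0 hlk hkh hk
    have hlh : low ≤ high := le_trans hlk hkh
    rw [getPowOf5Loop]
    simp only [hlh, if_true]
    have hfd : PySem.Int.floordiv (high - low) 2 = (high - low) / 2 :=
      PySem.Int.floordiv_eq_ediv_of_pos (by norm_num)
    set mid := low + PySem.Int.floordiv (high - low) 2 with hmid
    have hmb : low ≤ mid ∧ mid ≤ high := by rw [hmid, hfd]; omega
    by_cases he : (5 : Int) ^ mid.toNat = num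
    · simp only [he, if_true]
      have := pow5_inj (he.trans hk.symm)
      omega
    · simp only [he, if_false]
      by_cases hlt : (5 : Int) ^ mid.toNat < num
      · simp only [hlt, if_true]
        have hmk : mid.toNat < k.toNat := pow5_lt_exp (by rw [hk]; exact hlt)
        exact ih (low + 1) high k (by omega) (by omega) (by omega) hkh hk
      · simp only [hlt, if_false]
        have hkm : k.toNat < mid.toNat := by
          apply pow5_lt_exp
          rw [hk]
          omega
        exact ih low (high - 1) k (by omega) h0 hlk (by omega) hk

-- If no k in [low, high] has 5^k = num, A's loop returns -1.
lemma loopA_none (num : Int) : ∀ (N : Nat) (low high : Int),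
    (high + 1 - low).toNat ≤ N → 0 ≤ low →
    (∀ k : Int, low ≤ k → k ≤ high → (5 : Int) ^ k.toNat ≠ num) →
    getPowOf5Loop num low high = -1 := by
  intro N
  induction N with
  | zero =>
    intro low high hN h0 hnone
    rw [getPowOf5Loop]
    have : ¬ low ≤ high := by omega
    simp [this]
  | succ N ih =>
    intro low high hN h0 hnone
    rw [getPowOf5Loop]
    by_cases hlh : low ≤ high
    · simp only [hlh, if_true]
      have hfd : PySem.Int.floordiv (high - low) 2 = (high - low) / 2 :=
        PySem.Int.floordiv_eq_ediv_of_pos (by norm_num)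
      set mid := low + PySem.Int.floordiv (high - low) 2 with hmid
      have hmb : low ≤ mid ∧ mid ≤ high := by rw [hmid, hfd]; omega
      have hne : (5 : Int) ^ mid.toNat ≠ num := hnone mid hmb.1 hmb.2
      simp only [hne, if_false]
      by_cases hlt : (5 : Int) ^ mid.toNat < num
      · simp only [hlt, if_true]
        exact ih (low + 1) high (by omega) (by omega)
          (fun k h1 h2 => hnone k (by omega) h2)
      · simp only [hlt, if_false]
        exact ih low (high - 1) (by omega) h0
          (fun k h1 h2 => hnone k h1 (by omega))
    · simp [hlh]

-- If 5^k = num for some k in [n, 18], B's loop from (5^n, n) returns k.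
lemma loopB_found (num : Int) : ∀ (N n k : Nat),
    19 - n ≤ N → n ≤ k → k ≤ 18 → (5 : Int) ^ k = num →
    getPowOf5AltLoop num ((5 : Int) ^ n) n = (k : Int) := by
  intro N
  induction N with
  | zero => intro n k hN hnk hk18 _; omega
  | succ N ih =>
    intro n k hN hnk hk18 hk
    rw [getPowOf5AltLoop]
    have hn19 : n < 19 := by omega
    simp only [hn19, if_true]
    by_cases he : (5 : Int) ^ n = num
    · simp only [he, if_true]
      have := pow5_inj (he.trans hk.symm)
      omega
    · simp only [he, if_false]
      have hnk' : n ≠ k := fun h => he (h ▸ hk)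
      have : (5 : Int) ^ n * 5 = 5 ^ (n + 1) := (pow_succ 5 n).symm
      rw [this]
      exact ih (n + 1) k (by omega) (by omega) hk18 hk

-- If no k in [n, 18] has 5^k = num, B's loop from (5^n, n) returns -1.
lemma loopB_none (num : Int) : ∀ (N n : Nat),
    19 - n ≤ N →
    (∀ k : Nat, n ≤ k → k ≤ 18 → (5 : Int) ^ k ≠ num) →
    getPowOf5AltLoop num ((5 : Int) ^ n) n = -1 := by
  intro N
  induction N with
  | zero =>
    intro n hN hnone
    rw [getPowOf5AltLoop]
    have : ¬ n < 19 := by omega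
    simp [this]
  | succ N ih =>
    intro n hN hnone
    rw [getPowOf5AltLoop]
    by_cases hn19 : n < 19
    · simp only [hn19, if_true]
      have hne : (5 : Int) ^ n ≠ num := hnone n le_rfl (by omega)
      simp only [hne, if_false]
      have : (5 : Int) ^ n * 5 = 5 ^ (n + 1) := (pow_succ 5 n).symm
      rw [this]
      exact ih (n + 1) (by omega) (fun k h1 h2 => hnone k (by omega) h2)
    · simp [hn19]

-- ===== VERDICT (by name: the statement is the Claim_ definition above) =====
theorem getPowOf5_spec : Claim_equal_getPowOf5 := by
  intro num _
  unfold Spec_getPowOf5 getPowOf5 getPowOf5_alt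
  by_cases h : ∃ k : Nat, k ≤ 18 ∧ (5 : Int) ^ k = num
  · obtain ⟨k, hk18, hk⟩ := h
    have hA : getPowOf5Loop num 0 18 = (k : Int) := by
      apply loopA_found num 19 0 18 (k : Int) (by omega) (by omega)
        (by exact_mod_cast Int.natCast_nonneg k) (by exact_mod_cast hk18)
      simpa using hk
    have hB : getPowOf5AltLoop num 1 0 = (k : Int) := by
      have := loopB_found num 19 0 k (by omega) (Nat.zero_le k) hk18 hk
      simpa using this
    rw [hA, hB]
  · push Not at h
    have hA : getPowOf5Loop num 0 18 = -1 := by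
      apply loopA_none num 19 0 18 (by omega) (by omega)
      intro k h0 h18 hc
      exact h k.toNat (by omega) hc
    have hB : getPowOf5AltLoop num 1 0 = -1 := by
      have := loopB_none num 19 0 (by omega) (fun k _ hk18 => h k hk18)
      simpa using this
    rw [hA, hB]
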